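-- pv_equiv track=rewrite | github.com/pravallika-1305/codingPlatforms | IO.py | replaceIOUnderscore
-- ===== SOURCE A (Python) =====
-- def replaceIOUnderscore(string):
--     count = 0
--     string = list(string)
--     for i in range(len(string)):
--         if string[i] == "I":
--             for j in range(i + 1,len(string)):
--                 if string[j] == "O":
--                     count = count + 1
--                     string[i],string[j]= "_","_"
--                     break
--     return string
-- ===== SOURCE B (Python) =====
-- def replaceIOUnderscore(string):
--     chars = list(string)
--     pending = []   # positions of not-yet-matched "I", FIFO
--     head = 0       # queue head pointer (pop-left without O(n) list.pop(0))
--     matched = set()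
--     for idx, c in enumerate(chars):
--         if c == "I":
--             pending.append(idx)
--         elif c == "O" and head < len(pending):
--             matched.add(pending[head])
--             head += 1
--             matched.add(idx)
--     return ["_" if i in matched else c for i, c in enumerate(chars)]
-- ===== Notes on version B (the rewrite author's own statement) =====
-- stated objective: alternative
-- what changed: A scans forward from every 'I' for the next unconsumed 'O' and mutates the list in place (nested loops); B does one pass keeping a FIFO queue of pending 'I' indices, matches each 'O' to the earliest pending 'I', and then renders the matched positions as underscores.
import Mathlib
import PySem

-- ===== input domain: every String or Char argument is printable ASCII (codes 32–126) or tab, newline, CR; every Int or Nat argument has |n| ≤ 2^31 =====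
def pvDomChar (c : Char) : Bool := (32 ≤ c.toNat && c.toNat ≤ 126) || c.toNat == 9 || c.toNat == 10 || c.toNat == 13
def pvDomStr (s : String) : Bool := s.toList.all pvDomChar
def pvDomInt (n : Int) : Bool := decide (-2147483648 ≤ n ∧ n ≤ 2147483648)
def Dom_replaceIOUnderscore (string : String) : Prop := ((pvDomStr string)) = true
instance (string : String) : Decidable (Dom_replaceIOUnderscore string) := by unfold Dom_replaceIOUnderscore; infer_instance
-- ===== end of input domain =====

-- B replaces A's per-'I' forward rescan for the next unconsumed 'O' by a single pass with a
-- FIFO queue of pending 'I' indices (each 'O' pops the earliest pending 'I') plus a render pass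
-- over the matched positions: a different algorithm, same results.


-- ===== PORT A =====
-- inner loop `for j in range(i+1, len(string)): if string[j] == "O": … break`:
-- scan j upward, return the first j with s[j] == "O" (none = loop ends without break)
def pvFindO (s : List String) (j : Nat) : Option Nat :=
  if _h : j < s.length then
    if s[j]? = some "O" then some j else pvFindO s (j + 1)
  else none
termination_by s.length - j

-- outer loop over the remaining indices `is` (= range(len(string)), nonnegative, so Nat);
-- `count` is threaded exactly as in A (it is never returned)
def pvOuterA : List String → Nat → List Nat → List String
  | s, _, [] => s
  | s, count, i :: rest =>
    if s[i]? = some "I" then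
      match pvFindO s (i + 1) with
      | some j => pvOuterA ((s.set i "_").set j "_") (count + 1) rest
      | none => pvOuterA s count rest
    else pvOuterA s count rest

def replaceIOUnderscore (string : String) : List String :=
  let s := string.toList.map (fun c => String.ofList [c])   -- list(string)
  pvOuterA s 0 (List.range s.length)                    -- range(len(string)), bounds ≥ 0

-- ===== PORT B =====
-- the for-loop of Source B: state = (pending, head, matched)
def pvBLoop : List (Int × String) → List Int → Nat → PySem.Set Int → PySem.Set Int
  | [], _, _, matched => matched
  | (idx, c) :: rest, pending, head, matched =>
    if c = "I" then pvBLoop rest (pending ++ [idx]) head matched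
    else if c = "O" then
      if h : head < pending.length then
        pvBLoop rest pending (head + 1) (PySem.Set.add (PySem.Set.add matched pending[head]) idx)
      else pvBLoop rest pending head matched
    else pvBLoop rest pending head matched

def replaceIOUnderscore_alt (string : String) : List String :=
  let chars := string.toList.map (fun c => String.ofList [c])   -- list(string)
  let matched := pvBLoop (PySem.List.enumerate chars 0) [] 0 PySem.Set.empty
  (PySem.List.enumerate chars 0).map (fun ic => if ic.1 ∈ matched then "_" else ic.2)

-- ===== PRECONDITION & SPEC =====
def Spec_replaceIOUnderscore (string : String) (out : List String) : Prop := out = replaceIOUnderscore_alt string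
instance (string : String) (out : List String) : Decidable (Spec_replaceIOUnderscore string out) := by unfold Spec_replaceIOUnderscore; infer_instance

-- ===== CLAIM (what is proved, stated in full; the proofs are below) =====
def Claim_equal_replaceIOUnderscore : Prop := ∀ (string : String), Dom_replaceIOUnderscore string → Spec_replaceIOUnderscore string (replaceIOUnderscore string)

-- ===== LEMMAS AND PROOFS =====

-- common reference function: one pass with p = number of pending 'I's; an 'I' is matched
-- iff at least p+1 'O's remain after it, an 'O' is matched iff p > 0
def pvMark : Nat → List String → List String
  | _, [] => []
  | p, c :: t =>
    if c = "I" then (if p + 1 ≤ t.count "O" then "_" else "I") :: pvMark (p + 1) t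
    else if c = "O" then (if 0 < p then "_" else "O") :: pvMark (p - 1) t
    else c :: pvMark p t

-- ---- A-side ----

lemma pvFindO_cons (c : String) (t : List String) (j : Nat) :
    pvFindO (c :: t) (j + 1) = (pvFindO t j).map (· + 1) := by
    conv_lhs => rw [pvFindO]
    conv_rhs => rw [pvFindO]
    by_cases h : j < t.length
    · rw [dif_pos (show j + 1 < (c :: t).length by simpa using h), dif_pos h]
      simp only [List.getElem?_cons_succ]
      by_cases ho : t[j]? = some "O"
      · simp [ho]
      · rw [if_neg ho, if_neg ho]
        exact pvFindO_cons c t (j + 1)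
    · rw [dif_neg (by simpa using h), dif_neg h]; rfl
termination_by t.length - j

lemma pvFindO_none (t : List String) (hm : "O" ∉ t) (j : Nat) : pvFindO t j = none := by
    conv_lhs => rw [pvFindO]
    by_cases h : j < t.length
    · rw [dif_pos h]
      have ho : t[j]? ≠ some "O" := fun hc => hm (List.mem_of_getElem? hc)
      rw [if_neg ho]
      exact pvFindO_none t hm (j + 1)
    · exact dif_neg h
termination_by t.length - j

lemma pvFindO_none_fwd (t : List String) (j : Nat) :
    pvFindO t j = none → ∀ l, j ≤ l → t[l]? ≠ some "O" := by
    intro hnone l hl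
    rw [pvFindO] at hnone
    by_cases h : j < t.length
    · rw [dif_pos h] at hnone
      by_cases ho : t[j]? = some "O"
      · simp [ho] at hnone
      · rw [if_neg ho] at hnone
        rcases eq_or_lt_of_le hl with rfl | hlt
        · exact ho
        · exact pvFindO_none_fwd t (j + 1) hnone l hlt
    · intro hc
      obtain ⟨hlen, -⟩ := List.getElem?_eq_some_iff.mp hc
      omega
termination_by t.length - j

lemma pvFindO_some (t : List String) (j0 j : Nat) :
    pvFindO t j0 = some j →
      t[j]? = some "O" ∧ ∀ l, j0 ≤ l → l < j → t[l]? ≠ some "O" := by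
    intro hsome
    rw [pvFindO] at hsome
    by_cases h : j0 < t.length
    · rw [dif_pos h] at hsome
      by_cases ho : t[j0]? = some "O"
      · rw [if_pos ho] at hsome
        obtain rfl : j0 = j := Option.some_inj.mp hsome
        exact ⟨ho, fun l hl1 hl2 => absurd hl1 (by omega)⟩
      · rw [if_neg ho] at hsome
        obtain ⟨h1, h2⟩ := pvFindO_some t (j0 + 1) j hsome
        refine ⟨h1, fun l hl1 hl2 => ?_⟩
        rcases eq_or_lt_of_le hl1 with rfl | hlt
        · exact ho
        · exact h2 l hlt hl2
    · rw [dif_neg h] at hsome; cases hsome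
termination_by t.length - j0

lemma pvOuterA_shift (c : String) :
    ∀ (is_ : List Nat) (t : List String) (cnt : Nat),
      pvOuterA (c :: t) cnt (is_.map (· + 1)) = c :: pvOuterA t cnt is_ := by
  intro is_
  induction is_ with
  | nil => intro t cnt; rfl
  | cons i rest ih =>
    intro t cnt
    simp only [List.map_cons, pvOuterA, List.getElem?_cons_succ]
    rw [pvFindO_cons c t (i + 1)]
    by_cases hI : t[i]? = some "I"
    · rw [if_pos hI, if_pos hI]
      cases hF : pvFindO t (i + 1) with
      | none =>
        simp only [Option.map_none]
        exact ih t cnt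
      | some j =>
        simp only [Option.map_some]
        rw [List.set_cons_succ, List.set_cons_succ]
        exact ih _ _
    · rw [if_neg hI, if_neg hI]
      exact ih t cnt

lemma pvMark_noO : ∀ (t : List String), "O" ∉ t → ∀ p, pvMark p t = t := by
  intro t
  induction t with
  | nil => intro _ p; rfl
  | cons c t2 ih =>
    intro hm p
    have hc : c ≠ "O" := fun h => hm (by simp [h])
    have hm2 : "O" ∉ t2 := fun h => hm (List.mem_cons_of_mem _ h)
    by_cases hI : c = "I"
    · subst hI
      have h0 : t2.count "O" = 0 := List.count_eq_zero.mpr hm2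
      simp [pvMark, h0, ih hm2]
    · simp [pvMark, hI, hc, ih hm2]

lemma pvCount_set : ∀ (t : List String) (j : Nat), t[j]? = some "O" →
    (t.set j "_").count "O" + 1 = t.count "O" := by
  intro t
  induction t with
  | nil => intro j h; simp at h
  | cons c t2 ih =>
    intro j h
    cases j with
    | zero =>
      simp only [List.getElem?_cons_zero, Option.some_inj] at h
      subst h
      simp
    | succ j' =>
      simp only [List.getElem?_cons_succ] at h
      simp only [List.set_cons_succ, List.count_cons]
      have := ih j' h
      omega

lemma pvMark_set : ∀ (t : List String) (j : Nat) (p : Nat), t[j]? = some "O" →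
    (∀ l, l < j → t[l]? ≠ some "O") → pvMark (p + 1) t = pvMark p (t.set j "_") := by
  intro t
  induction t with
  | nil => intro j p h _; simp at h
  | cons c t2 ih =>
    intro j p h hfirst
    cases j with
    | zero =>
      simp only [List.getElem?_cons_zero, Option.some_inj] at h
      subst h
      simp [pvMark]
    | succ j' =>
      simp only [List.getElem?_cons_succ] at h
      have hc : c ≠ "O" := by
        have h0 := hfirst 0 (Nat.succ_pos _)
        simpa using h0
      have hfirst2 : ∀ l, l < j' → t2[l]? ≠ some "O" := fun l hl => by
        have hl1 := hfirst (l + 1) (by omega)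
        simpa using hl1
      rw [List.set_cons_succ]
      have hcount := pvCount_set t2 j' h
      have htail := ih j' (p + 1) h hfirst2
      by_cases hI : c = "I"
      · subst hI
        simp only [pvMark]
        simp only [if_true]
        rw [htail]
        congr 1
        by_cases hle : p + 1 + 1 ≤ t2.count "O"
        · rw [if_pos hle, if_pos (by omega)]
        · rw [if_neg hle, if_neg (by omega)]
      · have htail0 := ih j' p h hfirst2
        by_cases hcO : c = "O"
        · exact absurd hcO hc
        · simp only [pvMark, if_neg hI, if_neg hcO]
          rw [htail0]

lemma pvA_main : ∀ (n : Nat) (t : List String) (cnt : Nat), t.length = n →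
    pvOuterA t cnt (List.range n) = pvMark 0 t := by
  intro n
  induction n with
  | zero =>
    intro t cnt hlen
    rw [List.length_eq_zero_iff.mp hlen]
    rfl
  | succ n ih =>
    intro t cnt hlen
    cases t with
    | nil => simp at hlen
    | cons c t2 =>
      have hlen2 : t2.length = n := by simpa using hlen
      rw [List.range_succ_eq_map]
      simp only [pvOuterA, List.getElem?_cons_zero]
      by_cases hI : c = "I"
      · subst hI
        rw [if_pos rfl]
        rw [show (0 + 1) = 1 from rfl, show (1 : Nat) = 0 + 1 from rfl, pvFindO_cons "I" t2 0]
        cases hF : pvFindO t2 0 with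
        | none =>
          simp only [Option.map_none]
          have hm2 : "O" ∉ t2 := by
            intro hmem
            obtain ⟨l, hl, hget⟩ := List.getElem_of_mem hmem
            exact pvFindO_none_fwd t2 0 hF l (Nat.zero_le _)
              (by rw [List.getElem?_eq_some_iff]; exact ⟨hl, hget⟩)
          rw [pvOuterA_shift]
          rw [ih t2 cnt hlen2]
          have h0 : t2.count "O" = 0 := List.count_eq_zero.mpr hm2
          simp [pvMark, h0, pvMark_noO t2 hm2]
        | some j =>
          simp only [Option.map_some]
          obtain ⟨hO, hfirst⟩ := pvFindO_some t2 0 j hF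
          rw [List.set_cons_zero, List.set_cons_succ]
          rw [pvOuterA_shift]
          rw [ih (t2.set j "_") (cnt + 1) (by simpa using hlen2)]
          rw [← pvMark_set t2 j 0 hO (fun l hl => hfirst l (Nat.zero_le _) hl)]
          have hmem : "O" ∈ t2 := List.mem_of_getElem? hO
          have hpos : 0 + 1 ≤ t2.count "O" := by
            have := List.count_pos_iff.mpr hmem
            omega
          simp [pvMark, hpos]
      · rw [if_neg (by simpa using hI)]
        rw [pvOuterA_shift]
        rw [ih t2 cnt hlen2]
        by_cases hcO : c = "O"
        · subst hcO; simp [pvMark]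
        · simp [pvMark, hI, hcO]

-- ---- B-side ----

lemma pvBLoop_acc : ∀ (rest : List (Int × String)) (pending : List Int) (head : Nat)
    (m : PySem.Set Int) (x : Int),
    x ∈ pvBLoop rest pending head m ↔ x ∈ m ∨ x ∈ pvBLoop rest pending head PySem.Set.empty := by
  intro rest
  induction rest with
  | nil =>
    intro pending head m x
    simp [pvBLoop, PySem.Set.empty]
  | cons ic rest ih =>
    obtain ⟨i, c⟩ := ic
    intro pending head m x
    simp only [pvBLoop]
    by_cases hI : c = "I"
    · rw [if_pos hI, if_pos hI]
      exact ih _ _ _ _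
    · rw [if_neg hI, if_neg hI]
      by_cases hO : c = "O"
      · rw [if_pos hO, if_pos hO]
        by_cases hlen : head < pending.length
        · rw [dif_pos hlen, dif_pos hlen]
          rw [ih _ _ (PySem.Set.add (PySem.Set.add m pending[head]) i) x,
              ih _ _ (PySem.Set.add (PySem.Set.add PySem.Set.empty pending[head]) i) x]
          simp only [PySem.Set.mem_add, PySem.Set.empty, List.not_mem_nil]
          tauto
        · rw [dif_neg hlen, dif_neg hlen]
          exact ih _ _ _ _
      · rw [if_neg hO, if_neg hO]
        exact ih _ _ _ _

lemma pvBLoop_sub : ∀ (t : List String) (k : Int) (pending : List Int) (head : Nat) (x : Int),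
    x ∈ pvBLoop (PySem.List.enumerate t k) pending head PySem.Set.empty →
    x ∈ pending ∨ k ≤ x := by
  intro t
  induction t with
  | nil =>
    intro k pending head x hx
    simp [PySem.List.enumerate_nil, pvBLoop, PySem.Set.empty] at hx
  | cons c t2 ih =>
    intro k pending head x hx
    rw [PySem.List.enumerate_cons] at hx
    simp only [pvBLoop] at hx
    by_cases hI : c = "I"
    · rw [if_pos hI] at hx
      rcases ih (k + 1) (pending ++ [k]) head x hx with h | h
      · rcases List.mem_append.mp h with h | h
        · exact Or.inl h
        · simp only [List.mem_singleton] at h; right; omega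
      · right; omega
    · rw [if_neg hI] at hx
      by_cases hO : c = "O"
      · rw [if_pos hO] at hx
        by_cases hlen : head < pending.length
        · rw [dif_pos hlen] at hx
          rw [pvBLoop_acc] at hx
          rcases hx with h | h
          · simp only [PySem.Set.mem_add, PySem.Set.empty, List.not_mem_nil, false_or] at h
            rcases h with rfl | rfl
            · exact Or.inl (List.getElem_mem _)
            · right; omega
          · exact (ih _ _ _ _ h).imp id (fun hh => by omega)
        · rw [dif_neg hlen] at hx
          exact (ih _ _ _ _ hx).imp id (fun hh => by omega)
      · rw [if_neg hO] at hx
        exact (ih _ _ _ _ hx).imp id (fun hh => by omega)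

lemma pvB_main : ∀ (t : List String) (k : Int) (pending : List Int) (head : Nat),
    (∀ x ∈ pending, x < k) → pending.Nodup → head ≤ pending.length →
    (∀ (i : Nat) (h : head + i < pending.length),
        (pending[head + i] ∈ pvBLoop (PySem.List.enumerate t k) pending head PySem.Set.empty
          ↔ i < t.count "O"))
    ∧ (PySem.List.enumerate t k).map
        (fun ic => if ic.1 ∈ pvBLoop (PySem.List.enumerate t k) pending head PySem.Set.empty
                   then "_" else ic.2)
      = pvMark (pending.length - head) t := by
  intro t
  induction t with
  | nil =>
    intro k pending head _ _ _
    constructor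
    · intro i hi
      simp [PySem.List.enumerate_nil, pvBLoop, PySem.Set.empty]
    · simp [PySem.List.enumerate_nil, pvMark]
  | cons c t2 ih =>
    intro k pending head hlt hnd hhead
    rw [PySem.List.enumerate_cons]
    simp only [pvBLoop]
    by_cases hI : c = "I"
    · subst hI
      simp only [reduceIte]
      have hknotmem : k ∉ pending := fun hk => absurd (hlt k hk) (lt_irrefl k)
      have h1 : ∀ x ∈ pending ++ [k], x < k + 1 := by
        intro x hx
        rcases List.mem_append.mp hx with h | h
        · have := hlt x h; omega
        · simp only [List.mem_singleton] at h; omega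
      have h2 : (pending ++ [k]).Nodup := by
        rw [List.nodup_append]
        exact ⟨hnd, List.nodup_singleton k, fun a ha b hb => by
          simp only [List.mem_singleton] at hb
          subst hb
          exact fun he => hknotmem (he ▸ ha)⟩
      have h3 : head ≤ (pending ++ [k]).length := by simp; omega
      obtain ⟨iha, ihb⟩ := ih (k + 1) (pending ++ [k]) head h1 h2 h3
      constructor
      · intro i hi
        have hi' : head + i < (pending ++ [k]).length := by simp; omega
        have hiff := iha i hi'
        rw [List.getElem_append_left hi] at hiff
        have hcnt : ("I" :: t2).count "O" = t2.count "O" := by simp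
        rw [hcnt]
        exact hiff
      · simp only [List.map_cons]
        have hidx : head + (pending.length - head) < (pending ++ [k]).length := by simp; omega
        have hkiff := iha (pending.length - head) hidx
        have hidx2 : head + (pending.length - head) = pending.length := by omega
        simp only [hidx2] at hkiff
        simp only [List.getElem_concat_length] at hkiff
        have hlen1 : (pending ++ [k]).length - head = (pending.length - head) + 1 := by
          simp; omega
        rw [hlen1] at ihb
        simp only [pvMark, if_true]
        refine congrArg₂ _ ?_ ihb
        by_cases hcond : pending.length - head < t2.count "O"
        · rw [if_pos (hkiff.mpr hcond),
              if_pos (show pending.length - head + 1 ≤ t2.count "O" by omega)]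
        · rw [if_neg (fun hmem => hcond (hkiff.mp hmem)),
              if_neg (show ¬(pending.length - head + 1 ≤ t2.count "O") by omega)]
    · simp only [if_neg hI]
      by_cases hO : c = "O"
      · subst hO
        simp only [reduceIte]
        by_cases hlen : head < pending.length
        · simp only [dif_pos hlen]
          obtain ⟨iha, ihb⟩ := ih (k + 1) pending (head + 1)
            (fun x hx => by have := hlt x hx; omega) hnd (by omega)
          have hmem : ∀ x : Int,
              x ∈ pvBLoop (PySem.List.enumerate t2 (k + 1)) pending (head + 1)
                    (PySem.Set.add (PySem.Set.add PySem.Set.empty pending[head]) k)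
                ↔ x = pending[head] ∨ x = k
                    ∨ x ∈ pvBLoop (PySem.List.enumerate t2 (k + 1)) pending (head + 1)
                          PySem.Set.empty := by
            intro x
            rw [pvBLoop_acc]
            simp only [PySem.Set.mem_add, PySem.Set.empty, List.not_mem_nil, false_or]
            tauto
          constructor
          · intro i hi
            cases i with
            | zero =>
              have : pending[head + 0] = pending[head] := by simp
              rw [this, hmem]
              simp
            | succ i' =>
              rw [hmem]
              have hne1 : pending[head + (i' + 1)] ≠ pending[head] := by
                intro he
                have := (List.Nodup.getElem_inj_iff hnd).mp he
                omega
              have hne2 : pending[head + (i' + 1)] ≠ k := by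
                have := hlt _ (List.getElem_mem hi)
                omega
              have hre : head + (i' + 1) = head + 1 + i' := by omega
              have hiff := iha i' (by omega)
              have hcnt : ("O" :: t2).count "O" = t2.count "O" + 1 := by
                simp
              rw [hcnt]
              constructor
              · rintro (he | he | hm)
                · exact absurd he hne1
                · exact absurd he hne2
                · simp only [hre] at hm
                  have := hiff.mp hm
                  omega
              · intro hlt2
                right; right
                have h2' : i' < t2.count "O" := by omega
                have hm := hiff.mpr h2'
                simp only [hre]
                exact hm
          · simp only [List.map_cons]
            have hk : (k : Int) ∈ pvBLoop (PySem.List.enumerate t2 (k + 1)) pending (head + 1)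
                (PySem.Set.add (PySem.Set.add PySem.Set.empty pending[head]) k) :=
              (hmem k).mpr (Or.inr (Or.inl rfl))
            rw [if_pos hk]
            simp only [pvMark, if_true]
            have hp : 0 < pending.length - head := by omega
            rw [if_pos hp]
            refine congrArg₂ _ rfl ?_
            have hmapeq : (PySem.List.enumerate t2 (k + 1)).map
                  (fun ic => if ic.1 ∈ pvBLoop (PySem.List.enumerate t2 (k + 1)) pending (head + 1)
                      (PySem.Set.add (PySem.Set.add PySem.Set.empty pending[head]) k) then "_" else ic.2)
                = (PySem.List.enumerate t2 (k + 1)).map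
                  (fun ic => if ic.1 ∈ pvBLoop (PySem.List.enumerate t2 (k + 1)) pending (head + 1)
                      PySem.Set.empty then "_" else ic.2) := by
              apply List.map_congr_left
              intro ic hic
              rw [PySem.List.mem_enumerate_iff] at hic
              obtain ⟨n, hn, rfl⟩ := hic
              have hph := hlt _ (List.getElem_mem hlen)
              have hcond : ((k + 1 + (n : Int)) ∈ pvBLoop (PySem.List.enumerate t2 (k + 1)) pending (head + 1)
                      (PySem.Set.add (PySem.Set.add PySem.Set.empty pending[head]) k))
                  = ((k + 1 + (n : Int)) ∈ pvBLoop (PySem.List.enumerate t2 (k + 1)) pending (head + 1)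
                      PySem.Set.empty) := by
                rw [eq_iff_iff, hmem]
                constructor
                · rintro (he | he | hm)
                  · omega
                  · omega
                  · exact hm
                · exact fun hm => Or.inr (Or.inr hm)
              simp only [hcond]
            rw [hmapeq, ihb]
            congr 1
        · simp only [dif_neg hlen]
          obtain ⟨iha, ihb⟩ := ih (k + 1) pending head
            (fun x hx => by have := hlt x hx; omega) hnd hhead
          have hkn : (k : Int) ∉ pvBLoop (PySem.List.enumerate t2 (k + 1)) pending head
              PySem.Set.empty := by
            intro hk
            rcases pvBLoop_sub t2 (k + 1) pending head k hk with h | h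
            · exact absurd (hlt k h) (lt_irrefl k)
            · omega
          constructor
          · intro i hi
            exact absurd hi (by omega)
          · simp only [List.map_cons]
            rw [if_neg hkn]
            simp only [pvMark, if_true]
            have hp0 : pending.length - head = 0 := by omega
            rw [hp0, if_neg (lt_irrefl 0)]
            refine congrArg₂ _ rfl ?_
            rw [ihb, hp0]
      · simp only [if_neg hO]
        obtain ⟨iha, ihb⟩ := ih (k + 1) pending head
          (fun x hx => by have := hlt x hx; omega) hnd hhead
        have hkn : (k : Int) ∉ pvBLoop (PySem.List.enumerate t2 (k + 1)) pending head
            PySem.Set.empty := by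
          intro hk
          rcases pvBLoop_sub t2 (k + 1) pending head k hk with h | h
          · exact absurd (hlt k h) (lt_irrefl k)
          · omega
        constructor
        · intro i hi
          have hcnt : (c :: t2).count "O" = t2.count "O" := by
            simp [hO]
          rw [hcnt]
          exact iha i hi
        · simp only [List.map_cons]
          rw [if_neg hkn]
          simp only [pvMark]
          rw [if_neg hI, if_neg hO]
          exact congrArg₂ _ rfl ihb

-- ===== VERDICT (by name: the statement is the Claim_ definition above) =====
theorem replaceIOUnderscore_spec : Claim_equal_replaceIOUnderscore := by
  intro string _hdom
  unfold Spec_replaceIOUnderscore replaceIOUnderscore replaceIOUnderscore_alt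
  have hA := pvA_main (string.toList.map (fun c => String.ofList [c])).length
    (string.toList.map (fun c => String.ofList [c])) 0 rfl
  have hB := (pvB_main (string.toList.map (fun c => String.ofList [c])) 0 [] 0
    (by simp) (by simp) (by simp)).2
  simp only [List.length_nil, Nat.sub_zero] at hB
  rw [hA, hB]
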